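-- pv_equiv track=rewrite | github.com/FitMAnalytics/HMAC_encryption | utils.py | get_qgrams_from_hash_list
-- ===== SOURCE A (Python) =====
-- def get_qgrams_from_hash_list(hash_list, q=2, padded=True):
--     """
--     Groups a list of 1-gram hashes into q-gram tuples.
--     Input: ['hash1', 'hash2', 'hash3']
--     Output (q=2, padded=True): [('#', 'hash1'), ('hash1', 'hash2'), ('hash2', 'hash3'), ('hash3', '#')]
--     """
--     processed_list = list(hash_list)
--
--     # 1. Apply padding using a unique sentinel for the 'hash' space
--     if padded:
--         # We use a non-hex string or a specific sentinel to represent the pad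
--         pad_token = ["#PAD#"] * (q - 1)
--         processed_list = pad_token + processed_list + pad_token
--
--     qgram_list = []
--
--     # 2. Sliding window over the hash IDs
--     for i in range(len(processed_list) - q + 1):
--         # We store as a tuple because tuples are hashable (can be used in Counter/Sets)
--         qgram_tuple = tuple(processed_list[i:i+q])
--         qgram_list.append(qgram_tuple)
--
--     return qgram_list
-- ===== SOURCE B (Python) =====
-- def get_qgrams_from_hash_list(hash_list, q=2, padded=True):
--     processed_list = list(hash_list)
--     if padded:
--         pad_token = ["#PAD#"] * (q - 1)
--         processed_list = pad_token + processed_list + pad_token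
--     if q > len(processed_list):
--         return []  # fewer than q items: no q-gram
--     # transpose q parallel offset views; zip stops at the shortest view
--     return list(zip(*(processed_list[i:] for i in range(q))))
-- ===== Notes on version B (the rewrite author's own statement) =====
-- stated objective: idiomatic
-- what changed: Replaces the index-based sliding-window loop (one slice per index) with a transpose of q parallel offset views via zip, which stops naturally at the shortest view.
-- outside the precondition, e.g. on get_qgrams_from_hash_list(['a'], 0, True): A returns [(), ()], B returns []; on get_qgrams_from_hash_list(['a', 'b'], -1, True): A returns [('a',), (), (), ()], B returns []
import Mathlib
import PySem

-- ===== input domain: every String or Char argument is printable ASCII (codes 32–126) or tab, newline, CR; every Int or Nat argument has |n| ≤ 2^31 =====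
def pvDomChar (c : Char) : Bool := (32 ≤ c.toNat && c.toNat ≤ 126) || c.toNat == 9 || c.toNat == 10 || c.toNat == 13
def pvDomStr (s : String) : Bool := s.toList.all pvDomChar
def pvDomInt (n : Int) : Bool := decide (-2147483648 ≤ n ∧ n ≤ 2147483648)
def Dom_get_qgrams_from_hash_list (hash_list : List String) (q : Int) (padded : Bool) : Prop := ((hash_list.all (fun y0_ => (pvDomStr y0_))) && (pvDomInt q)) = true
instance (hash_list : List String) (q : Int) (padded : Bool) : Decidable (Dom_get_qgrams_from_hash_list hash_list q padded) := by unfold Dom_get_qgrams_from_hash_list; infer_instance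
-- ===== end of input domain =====

-- ===== PORT A =====
-- Literal port of A: pad (if requested), then sliding-window loop appending slices.
def get_qgrams_from_hash_list (hash_list : List String) (q : Int) (padded : Bool) : List (List String) :=
  let processed_list := hash_list
  let processed_list :=
    if padded then
      let pad_token := List.replicate (q - 1).toNat "#PAD#"
      pad_token ++ processed_list ++ pad_token
    else processed_list
  (PySem.List.pyRange 0 ((processed_list.length : Int) - q + 1) 1).foldl
    (fun acc i => acc ++ [PySem.List.slice processed_list (some i) (some (i + q))]) []

-- ===== PORT B =====
-- B's zip(*views): take heads of all views while every view is nonempty.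
def pvZipN (fuel : Nat) (ls : List (List String)) : List (List String) :=
  match fuel with
  | 0 => []
  | fuel + 1 =>
    if ls ≠ [] ∧ ls.all (· ≠ []) then
      (ls.map (·.headD "")) :: pvZipN fuel (ls.map (·.tail))
    else []

-- B port: pad exactly as in Source B, then transpose q offset views (processed[i:]) with zip.
def get_qgrams_from_hash_list_alt (hash_list : List String) (q : Int) (padded : Bool) : List (List String) :=
  let processed_list := hash_list
  let processed_list :=
    if padded then
      let pad_token := List.replicate (q - 1).toNat "#PAD#"
      pad_token ++ processed_list ++ pad_token
    else processed_list
  if (processed_list.length : Int) < q then []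
  else
    let views := (PySem.List.pyRange 0 q 1).map (fun i => processed_list.drop i.toNat)
    pvZipN (views.headD []).length views

-- ===== PRECONDITION & SPEC =====
-- Pre_ excludes q < 1 (outside the natural q-gram domain): there A's clamped slicing returns
-- accidental empty/short tuples (e.g. len+1 empty tuples for q = 0) while B's zip returns [];
-- both are defensible readings of an unspecified corner.
def Pre_get_qgrams_from_hash_list (hash_list : List String) (q : Int) (padded : Bool) : Prop := 1 ≤ q
instance (hash_list : List String) (q : Int) (padded : Bool) : Decidable (Pre_get_qgrams_from_hash_list hash_list q padded) := by unfold Pre_get_qgrams_from_hash_list; infer_instance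
def pvWitness_get_qgrams_from_hash_list : List String × Int × Bool := (["hash1", "hash2", "hash3"], 2, true)
def Spec_get_qgrams_from_hash_list (hash_list : List String) (q : Int) (padded : Bool) (out : List (List String)) : Prop := out = get_qgrams_from_hash_list_alt hash_list q padded
instance (hash_list : List String) (q : Int) (padded : Bool) (out : List (List String)) : Decidable (Spec_get_qgrams_from_hash_list hash_list q padded out) := by unfold Spec_get_qgrams_from_hash_list; infer_instance

-- ===== CLAIM (what is proved, stated in full; the proofs are below) =====
def Claim_equal_get_qgrams_from_hash_list : Prop := ∀ (hash_list : List String) (q : Int) (padded : Bool), Dom_get_qgrams_from_hash_list hash_list q padded → Pre_get_qgrams_from_hash_list hash_list q padded → Spec_get_qgrams_from_hash_list hash_list q padded (get_qgrams_from_hash_list hash_list q padded)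

-- ===== LEMMAS AND PROOFS =====

-- common window recursion: all length-qn windows of p (for qn ≥ 1)
def pvWindows (qn : Nat) : List String → List (List String)
  | [] => []
  | a :: rest => if qn ≤ rest.length + 1 then (a :: rest).take qn :: pvWindows qn rest else []

theorem pvA_eq_windows (p : List String) (qn : Nat) (hq : 1 ≤ qn) :
    (List.range (p.length + 1 - qn)).map (fun i => (p.drop i).take qn) = pvWindows qn p := by
  induction p with
  | nil =>
    have : 0 + 1 - qn = 0 := by omega
    simp [pvWindows, this]
  | cons a rest ih =>
    by_cases h : qn ≤ rest.length + 1
    · have hlen : (a :: rest).length + 1 - qn = (rest.length + 1 - qn) + 1 := by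
        simp only [List.length_cons]; omega
      rw [hlen, List.range_succ_eq_map, List.map_cons, List.map_map]
      simp only [pvWindows, if_pos h, List.drop_zero]
      refine congrArg₂ _ rfl ?_
      rw [← ih]
      rfl
    · simp only [List.length_cons]
      have hlen : rest.length + 1 + 1 - qn = 0 := by omega
      rw [hlen]
      simp [pvWindows, h]

theorem pvHeads_eq_take (p : List String) (qn : Nat) (h : qn ≤ p.length) :
    (List.range qn).map (fun i => (p.drop i).headD "") = p.take qn := by
  apply List.ext_getElem
  · simp [Nat.min_eq_left h]
  · intro k hk1 hk2
    simp only [List.getElem_map, List.getElem_range, List.getElem_take]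
    rw [List.headD_eq_head?_getD, List.head?_drop]
    have hk : k < p.length := by simp at hk1; omega
    simp [hk]

theorem pvZipN_eq_windows (qn : Nat) (hq : 1 ≤ qn) (p : List String) :
    pvZipN p.length ((List.range qn).map (fun i => p.drop i)) = pvWindows qn p := by
  induction p with
  | nil => simp [pvZipN, pvWindows]
  | cons a rest ih =>
    rw [List.length_cons, pvZipN]
    by_cases h : qn ≤ rest.length + 1
    · rw [if_pos]
      · have htails : ((List.range qn).map (fun i => (a :: rest).drop i)).map (·.tail)
            = (List.range qn).map (fun i => rest.drop i) := by
          rw [List.map_map]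
          refine List.map_congr_left fun i _ => ?_
          simp only [Function.comp_apply, List.tail_drop, List.drop_succ_cons]
        have hheads : ((List.range qn).map (fun i => (a :: rest).drop i)).map (·.headD "")
            = (List.range qn).map (fun i => ((a :: rest).drop i).headD "") := by
          rw [List.map_map]; rfl
        rw [htails, ih, hheads, pvHeads_eq_take _ _ (by simpa using h)]
        simp [pvWindows, h]
      · constructor
        · simp [List.map_eq_nil_iff, List.range_eq_nil]; omega
        · simp only [List.all_eq_true, List.mem_map, List.mem_range]
          rintro x ⟨i, hi, rfl⟩
          simp only [ne_eq, List.drop_eq_nil_iff, decide_eq_true_eq, List.length_cons]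
          omega
    · rw [if_neg]
      · simp [pvWindows, h]
      · intro ⟨_, hall⟩
        simp only [List.all_eq_true, List.mem_map, List.mem_range] at hall
        have := hall _ ⟨qn - 1, by omega, rfl⟩
        simp only [ne_eq, List.drop_eq_nil_iff, decide_eq_true_eq, List.length_cons] at this
        omega

-- ===== VERDICT (by name: the statement is the Claim_ definition above) =====
theorem get_qgrams_from_hash_list_spec : Claim_equal_get_qgrams_from_hash_list := by
  intro hash_list q padded _ hpre
  unfold Spec_get_qgrams_from_hash_list get_qgrams_from_hash_list get_qgrams_from_hash_list_alt
  have hq1 : 1 ≤ q := hpre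
  set p : List String := if padded then
      List.replicate (q - 1).toNat "#PAD#" ++ hash_list ++ List.replicate (q - 1).toNat "#PAD#"
    else hash_list with hp
  simp only []
  set qn : Nat := q.toNat with hqn
  have hqcast : (qn : Int) = q := Int.toNat_of_nonneg (by omega)
  have hqn1 : 1 ≤ qn := by omega
  -- A side
  have hA : (PySem.List.pyRange 0 ((p.length : Int) - q + 1) 1).foldl
      (fun acc i => acc ++ [PySem.List.slice p (some i) (some (i + q))]) []
      = (List.range (p.length + 1 - qn)).map (fun i => (p.drop i).take qn) := by
    rw [PySem.List.foldl_append_singleton_eq_map, PySem.List.pyRange_one, List.map_map]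
    have hcount : (((p.length : Int) - q + 1) - 0).toNat = p.length + 1 - qn := by omega
    rw [hcount]
    refine List.map_congr_left fun k hk => ?_
    simp only [Function.comp_apply, zero_add]
    rw [PySem.List.slice_toNat p (by positivity) (by omega)]
    congr 1
    omega
  -- B side
  have hviews : (PySem.List.pyRange 0 q 1).map (fun i => p.drop i.toNat)
      = (List.range qn).map (fun i => p.drop i) := by
    rw [PySem.List.pyRange_one, List.map_map]
    have : (q - 0).toNat = qn := by omega
    rw [this]
    refine List.map_congr_left fun k hk => ?_
    simp only [Function.comp_apply, zero_add, Int.toNat_natCast]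
  have hfuel : ((((List.range qn).map (fun i => p.drop i)).headD []).length) = p.length := by
    rw [List.range_eq_range'] -- ensure nonempty head is drop 0
    cases hqn1' : qn with
    | zero => omega
    | succ m =>
      simp [List.range_succ_eq_map, ← List.range_eq_range']
  rw [hA]
  by_cases hlen : (p.length : Int) < q
  · rw [if_pos hlen]
    have hz : p.length + 1 - qn = 0 := by omega
    rw [hz, List.range_zero, List.map_nil]
  · rw [if_neg hlen]
    rw [hviews, pvA_eq_windows p qn hqn1, hfuel, pvZipN_eq_windows qn hqn1 p]
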